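-- pv_equiv track=rewrite | github.com/XyeaOvO/poetry-generator | src/poetry_generator/models/lightning.py | _tokens_since_newline
-- ===== SOURCE A (Python) =====
-- from typing import Dict, List, Sequence, Tuple
--
-- def _tokens_since_newline(
--     generated: Sequence[int],
--     newline_idx: int | None,
-- ) -> int:
--     if newline_idx is None:
--         return len(generated)
--     for offset, token in enumerate(reversed(generated), 1):
--         if token == newline_idx:
--             return offset - 1
--     return len(generated)
-- ===== SOURCE B (Python) =====
-- def _tokens_since_newline(generated, newline_idx):
--     if newline_idx is None:
--         return len(generated)
--     last = -1
--     for i, token in enumerate(generated):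
--         if token == newline_idx:
--             last = i
--     return len(generated) - 1 - last if last >= 0 else len(generated)
-- ===== Notes on version B (the rewrite author's own statement) =====
-- stated objective: alternative
-- what changed: Replaces the backward early-returning scan over reversed(generated) with a single forward pass that maintains the index of the last newline token and computes the answer from it after the loop.
import Mathlib
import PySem

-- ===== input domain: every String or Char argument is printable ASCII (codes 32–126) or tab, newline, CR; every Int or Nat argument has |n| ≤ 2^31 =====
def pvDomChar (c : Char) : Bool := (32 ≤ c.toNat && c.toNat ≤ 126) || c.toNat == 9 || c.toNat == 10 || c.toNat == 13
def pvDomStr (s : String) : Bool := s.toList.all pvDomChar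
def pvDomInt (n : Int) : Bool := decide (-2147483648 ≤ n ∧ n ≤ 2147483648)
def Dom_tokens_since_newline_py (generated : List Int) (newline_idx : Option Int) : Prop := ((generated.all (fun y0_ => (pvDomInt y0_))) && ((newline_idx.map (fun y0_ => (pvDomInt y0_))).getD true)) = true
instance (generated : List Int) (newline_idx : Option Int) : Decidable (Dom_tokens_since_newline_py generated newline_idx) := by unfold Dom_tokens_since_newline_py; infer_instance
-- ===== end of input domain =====

-- B replaces A's backward early-returning scan with a forward pass maintaining the last newline index.
-- ===== PORT A =====
-- backward scan: for offset, token in enumerate(reversed(generated), 1): if token == newline_idx: return offset - 1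
def pvALoop (l : List Int) (nl : Int) (offset : Int) : Option Int :=
  match l with
  | [] => none
  | t :: rest => if t = nl then some (offset - 1) else pvALoop rest nl (offset + 1)

def tokens_since_newline_py (generated : List Int) (newline_idx : Option Int) : Int :=
  match newline_idx with
  | none => (generated.length : Int)
  | some nl =>
    match pvALoop generated.reverse nl 1 with
    | some r => r
    | none => (generated.length : Int)

-- ===== PORT B =====
-- forward pass: last = -1; for i, token in enumerate(generated): if token == newline_idx: last = i
def pvBLoop (l : List Int) (nl : Int) (i : Int) (last : Int) : Int :=
  match l with
  | [] => last
  | t :: rest => pvBLoop rest nl (i + 1) (if t = nl then i else last)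

def tokens_since_newline_py_alt (generated : List Int) (newline_idx : Option Int) : Int :=
  match newline_idx with
  | none => (generated.length : Int)
  | some nl =>
    let last := pvBLoop generated nl 0 (-1)
    if last ≥ 0 then (generated.length : Int) - 1 - last else (generated.length : Int)

-- ===== PRECONDITION & SPEC =====
def Spec_tokens_since_newline_py (generated : List Int) (newline_idx : Option Int) (out : Int) : Prop := out = tokens_since_newline_py_alt generated newline_idx
instance (generated : List Int) (newline_idx : Option Int) (out : Int) : Decidable (Spec_tokens_since_newline_py generated newline_idx out) := by unfold Spec_tokens_since_newline_py; infer_instance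

-- ===== CLAIM (what is proved, stated in full; the proofs are below) =====
def Claim_equal_tokens_since_newline_py : Prop := ∀ (generated : List Int) (newline_idx : Option Int), Dom_tokens_since_newline_py generated newline_idx → Spec_tokens_since_newline_py generated newline_idx (tokens_since_newline_py generated newline_idx)

-- ===== LEMMAS AND PROOFS =====
theorem pvALoop_eq (l : List Int) (nl : Int) (offset : Int) :
    pvALoop l nl offset =
      match l.findIdx? (fun t => t = nl) with
      | some k => some (offset + (k : Int) - 1)
      | none => none := by
  induction l generalizing offset with
  | nil => simp [pvALoop]
  | cons t rest ih =>
    by_cases h : t = nl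
    · simp [pvALoop, h, List.findIdx?_cons]
    · simp only [pvALoop, if_neg h, ih, List.findIdx?_cons , decide_eq_false h]
      cases hf : rest.findIdx? (fun t => decide (t = nl)) with
      | none => simp
      | some k =>
        simp only [Option.map_some]
        push_cast
        ring_nf

theorem pvBLoop_eq (l : List Int) (nl : Int) (i last : Int) :
    pvBLoop l nl i last =
      match l.reverse.findIdx? (fun t => t = nl) with
      | some k => i + ((l.length : Int) - 1 - (k : Int))
      | none => last := by
  induction l generalizing i last with
  | nil => simp [pvBLoop]
  | cons t rest ih =>
    simp only [pvBLoop, ih, List.reverse_cons, List.findIdx?_append, List.length_cons]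
    cases hf : rest.reverse.findIdx? (fun t => decide (t = nl)) with
    | some k =>
      simp only [Option.some_or]
      push_cast
      ring_nf
    | none =>
      simp only [Option.none_or, List.findIdx?_cons, List.findIdx?_nil]
      by_cases h : t = nl
      · simp only [if_pos h, decide_eq_true h, Option.map, List.length_reverse]
        push_cast
        ring_nf
      · simp [h]

-- ===== VERDICT (by name: the statement is the Claim_ definition above) =====
theorem tokens_since_newline_py_spec : Claim_equal_tokens_since_newline_py := by
  intro generated newline_idx _
  unfold Spec_tokens_since_newline_py tokens_since_newline_py tokens_since_newline_py_alt
  cases newline_idx with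
  | none => rfl
  | some nl =>
    simp only [pvALoop_eq, pvBLoop_eq]
    cases hf : generated.reverse.findIdx? (fun t => decide (t = nl)) with
    | none => simp
    | some k =>
      have hk : k < generated.length := by
        rcases (List.findIdx?_eq_some_iff_getElem.mp hf) with ⟨h, _⟩
        simpa using h
      have hge : (0:Int) + ((generated.length : Int) - 1 - (k:Int)) ≥ 0 := by
        omega
      rw [if_pos hge]
      ring_nf
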